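-- pv_equiv track=rewrite | github.com/ngaopi/dictionary | codewar.py | num
-- ===== SOURCE A (Python) =====
-- def num(a,b):
--     i=0
--     x=1
--     while i<len(a):
--         x=x*a[i]
--         j=0
--         y=1
--         while j<len(b):
--             y=y*b[j]
--             if x>y:
--                 n=x-y
--             else:
--                 n=y-x
--             j=j+1
--         i=i+1
--     return n
-- ===== SOURCE B (Python) =====
-- def num(a, b):
--     pa = 1
--     for v in a:
--         pa *= v
--     pb = 1
--     for v in b:
--         pb *= v
--     return abs(pa - pb)
-- ===== Notes on version B (the rewrite author's own statement) =====
-- stated objective: faster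
-- what changed: A recomputes the running product of b (and the difference) inside a nested loop for every element of a; B computes each list's product once in a single pass and returns abs(pa - pb).
-- crash fix: When a or b is empty, A raises UnboundLocalError (n is never assigned); B returns abs(prod(a) - prod(b)) with the empty product 1. — e.g. on num([], [3]): A raises UnboundLocalError, B returns 2
import Mathlib
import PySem

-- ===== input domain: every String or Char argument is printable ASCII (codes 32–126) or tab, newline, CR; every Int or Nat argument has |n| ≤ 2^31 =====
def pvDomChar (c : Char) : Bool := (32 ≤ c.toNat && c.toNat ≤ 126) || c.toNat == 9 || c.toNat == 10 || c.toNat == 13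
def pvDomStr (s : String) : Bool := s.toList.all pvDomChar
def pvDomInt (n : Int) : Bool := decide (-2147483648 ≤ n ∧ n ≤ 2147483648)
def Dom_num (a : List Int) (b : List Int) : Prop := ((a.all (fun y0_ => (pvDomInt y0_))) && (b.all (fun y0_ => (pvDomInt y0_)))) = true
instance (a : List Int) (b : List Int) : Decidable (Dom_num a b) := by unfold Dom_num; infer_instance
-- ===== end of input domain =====

-- B computes each list's product in one pass and returns abs(pa - pb), replacing A's nested O(n*m) loops; equal return values wherever A returns (both lists nonempty).


-- ===== PORT A =====
-- inner 'while j < len(b)' loop: state (y, n); n stays none exactly where Python's n is unbound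
def numInner (x : Int) : List Int → Int → Option Int → Option Int
  | [], _, n => n
  | v :: rest, y, n =>
      let y' := y * v
      let n' := if x > y' then x - y' else y' - x
      numInner x rest y' (some n')

-- outer 'while i < len(a)' loop: state (x, n)
def numOuter (b : List Int) : List Int → Int → Option Int → Option Int
  | [], _, n => n
  | v :: rest, x, n => numOuter b rest (x * v) (numInner (x * v) b 1 n)

def num (a : List Int) (b : List Int) : Int :=
  (numOuter b a 1 none).getD 0   -- none = Python's UnboundLocalError, excluded by Pre_num

-- ===== PORT B =====
def num_alt (a : List Int) (b : List Int) : Int :=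
  let pa := a.foldl (· * ·) 1
  let pb := b.foldl (· * ·) 1
  |pa - pb|

-- ===== PRECONDITION & SPEC =====
-- A raises UnboundLocalError ('n' never assigned) iff a or b is empty; exactly those inputs are excluded.
def Pre_num (a : List Int) (b : List Int) : Prop := a ≠ [] ∧ b ≠ []
instance (a : List Int) (b : List Int) : Decidable (Pre_num a b) := by unfold Pre_num; infer_instance
def pvWitness_num : List Int × List Int := ([2, 3], [4, 5])

-- When a or b is empty, A raises UnboundLocalError (n is never assigned); B returns abs(prod(a) - prod(b)) with the empty product 1.
def Raises_num (a : List Int) (b : List Int) : Prop := a = [] ∨ b = []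
instance (a : List Int) (b : List Int) : Decidable (Raises_num a b) := by unfold Raises_num; infer_instance
def pvRaiseWitness_num : List Int × List Int := ([], [3])
def pvRaiseWitnessOut_num : Int := 2

def Spec_num (a : List Int) (b : List Int) (out : Int) : Prop := out = num_alt a b
instance (a : List Int) (b : List Int) (out : Int) : Decidable (Spec_num a b out) := by unfold Spec_num; infer_instance

-- ===== CLAIM (what is proved, stated in full; the proofs are below) =====
def Claim_equal_num : Prop := ∀ (a : List Int) (b : List Int), Dom_num a b → Pre_num a b → Spec_num a b (num a b)
def Claim_raises_num : Prop := (∀ (a : List Int) (b : List Int), Dom_num a b → Raises_num a b → ¬ Pre_num a b) ∧ (Dom_num (pvRaiseWitness_num.1) (pvRaiseWitness_num.2) ∧ Raises_num (pvRaiseWitness_num.1) (pvRaiseWitness_num.2) ∧ num_alt (pvRaiseWitness_num.1) (pvRaiseWitness_num.2) = pvRaiseWitnessOut_num)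

-- ===== LEMMAS AND PROOFS =====

-- the inner loop, run on a nonempty b, ends with n = |x - (product of b starting from y)|
lemma numInner_eq (x : Int) (b : List Int) (y : Int) (n : Option Int) (hb : b ≠ []) :
    numInner x b y n = some (|x - b.foldl (· * ·) y|) := by
  induction b generalizing y n with
  | nil => exact absurd rfl hb
  | cons v rest ih =>
      by_cases hr : rest = []
      · subst hr
        simp only [numInner, List.foldl]
        congr 1
        split_ifs with h
        · rw [abs_of_pos (by omega)]
        · rw [abs_of_nonpos (by omega)]; ring
      · simp only [numInner, List.foldl]
        exact ih _ _ hr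

-- the outer loop threads x = running product of a; final n = |prod a - prod b|
lemma numOuter_eq (b : List Int) (a : List Int) (x : Int) (n : Option Int)
    (ha : a ≠ []) (hb : b ≠ []) :
    numOuter b a x n = some (|a.foldl (· * ·) x - b.foldl (· * ·) 1|) := by
  induction a generalizing x n with
  | nil => exact absurd rfl ha
  | cons v rest ih =>
      by_cases hr : rest = []
      · subst hr
        simp only [numOuter, List.foldl]
        exact numInner_eq _ _ _ _ hb
      · simp only [numOuter, List.foldl]
        exact ih _ _ hr

-- ===== VERDICT (by name: the statement is the Claim_ definition above) =====
theorem num_spec : Claim_equal_num := by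
  intro a b _ hpre
  unfold Spec_num num num_alt
  rw [numOuter_eq b a 1 none hpre.1 hpre.2]
  rfl

@[simp] theorem num_raises : Claim_raises_num := by
  unfold Claim_raises_num
  refine ⟨fun a b _ hr hp => ?_, by decide⟩
  rcases hr with h | h
  · exact hp.1 h
  · exact hp.2 h
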